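-- pv_equiv track=rewrite | github.com/eml-eda/q-ppg | architecture_search/utils.py | gamma_mul
-- ===== SOURCE A (Python) =====
-- import math
-- import copy
--
-- def gamma_mul(dil_fact, it=0, line=[]):
--
--     # entry point
--     if it == 0:
--         line = list()
--         line.extend([[1]])
--         it += 1
--
--     # exit point
--     elif it == int(math.log(dil_fact, 2)):
--         return line
--
--     else:
--         #it += 1
--         for pos in range(len(line)):
--             line[pos].append(0)
--
--         line.extend([[0]*(it) + [1]])
--
--         line.extend(copy.deepcopy(line[:(2**it-1)]))
--
--         it += 1
--
--     return gamma_mul(dil_fact, it, line)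
-- ===== SOURCE B (Python) =====
-- import math
--
-- def gamma_mul(dil_fact, it=0, line=[]):
--     # Iterative version of the same doubling process: one for-loop over the
--     # levels, rebuilding the list functionally (no recursion, no deepcopy,
--     # no in-place mutation of the caller's argument, no mutable-default hazard).
--     levels = int(math.log(dil_fact, 2))
--     if it == 0:
--         line = [[1]]
--         it = 1
--     out = line
--     for k in range(it, levels):
--         out = [row + [0] for row in out] + [[0] * k + [1]]
--         out = out + [row[:] for row in out[:2 ** k - 1]]
--     return out
-- ===== Notes on version B (the rewrite author's own statement) =====
-- stated objective: simpler
-- what changed: Replaces the self-recursion (with its mutable default argument, in-place row mutation and copy.deepcopy of the prefix) by a single iterative for-loop over the levels that rebuilds the list functionally with comprehensions.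
import Mathlib
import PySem

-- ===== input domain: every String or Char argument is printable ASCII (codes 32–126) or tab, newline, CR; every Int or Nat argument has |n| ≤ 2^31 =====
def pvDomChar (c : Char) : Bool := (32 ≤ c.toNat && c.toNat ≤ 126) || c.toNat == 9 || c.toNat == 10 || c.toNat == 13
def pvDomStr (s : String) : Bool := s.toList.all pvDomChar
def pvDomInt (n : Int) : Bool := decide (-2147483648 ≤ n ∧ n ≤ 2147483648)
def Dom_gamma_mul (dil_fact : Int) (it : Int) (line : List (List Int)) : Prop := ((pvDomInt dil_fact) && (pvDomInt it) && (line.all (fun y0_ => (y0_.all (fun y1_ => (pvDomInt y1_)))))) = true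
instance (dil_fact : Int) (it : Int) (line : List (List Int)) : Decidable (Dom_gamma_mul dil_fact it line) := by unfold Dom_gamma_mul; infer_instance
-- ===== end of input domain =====

-- B replaces A's self-recursion (mutable default, in-place mutation, deepcopy) by one iterative
-- loop over the levels rebuilding the list functionally; equivalence is about the RETURN value
-- (on resumption calls with 1 ≤ it < log2(dil_fact) A also mutates the caller's `line` in place, B never does).

-- Port of Python's int(math.log(d, 2)) for 2 ≤ d ≤ 2^31 (= Dom's bound): on that range the
-- float expression equals floor(log2 d) = bit_length - 1 (checked at all power-of-two
-- boundaries); for d ≤ 0 Python raises, which Pre_ excludes.  Both Pythons make this call.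
def pyLog2 (d : Int) : Int := Int.ofNat (Nat.log2 d.toNat)

-- ===== PORT A =====
-- one body of A's else-branch: append 0 to every row in place, extend with [0]*it+[1],
-- extend with a deep copy of the first 2**it-1 rows
def gammaStepA (it : Int) (line : List (List Int)) : List (List Int) :=
  let l1 := line.map (fun r => r ++ [0])
  let l2 := l1 ++ [List.replicate it.toNat 0 ++ [1]]
  l2 ++ l2.take (2 ^ it.toNat - 1)

-- A's recursion, fuelled (the Python recursion diverges when it > int(log2 d), outside Pre_)
def gammaRecA (L : Int) : Nat → Int → List (List Int) → List (List Int)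
  | 0, _, line => line
  | fuel+1, it, line =>
    if it = 0 then gammaRecA L fuel 1 [[1]]
    else if it = L then line
    else gammaRecA L fuel (it + 1) (gammaStepA it line)

def gamma_mul (dil_fact : Int) (it : Int) (line : List (List Int)) : List (List Int) :=
  gammaRecA (pyLog2 dil_fact) ((pyLog2 dil_fact - it).toNat + 2) it line

-- ===== PORT B =====
-- Source B's loop body; `row[:]` is a shallow copy, the identity on immutable Lean lists,
-- kept as a literal `.map (fun row => row)`
def stepB (out : List (List Int)) (k : Int) : List (List Int) :=
  let out1 := out.map (fun row => row ++ [0]) ++ [List.replicate k.toNat 0 ++ [1]]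
  out1 ++ (out1.take (2 ^ k.toNat - 1)).map (fun row => row)

def gamma_mul_alt (dil_fact : Int) (it : Int) (line : List (List Int)) : List (List Int) :=
  let levels := pyLog2 dil_fact
  let it1 := if it = 0 then 1 else it
  let start := if it = 0 then [[(1 : Int)]] else line
  (PySem.List.pyRange it1 levels 1).foldl stepB start

-- ===== PRECONDITION & SPEC =====
-- Pre_ is exactly where the Python A returns: 2 ≤ dil_fact and 0 ≤ it ≤ int(log2 dil_fact).
-- Outside it A raises (ValueError for dil_fact ≤ 0, TypeError for it < 0) or recurses
-- forever (dil_fact = 1, or it > int(log2 dil_fact)).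
def Pre_gamma_mul (dil_fact : Int) (it : Int) (line : List (List Int)) : Prop :=
  2 ≤ dil_fact ∧ 0 ≤ it ∧ it ≤ Int.ofNat (Nat.log2 dil_fact.toNat)
instance (dil_fact : Int) (it : Int) (line : List (List Int)) : Decidable (Pre_gamma_mul dil_fact it line) := by unfold Pre_gamma_mul; infer_instance

def pvWitness_gamma_mul : Int × Int × List (List Int) := (4, 0, [])

def Spec_gamma_mul (dil_fact : Int) (it : Int) (line : List (List Int)) (out : List (List Int)) : Prop := out = gamma_mul_alt dil_fact it line
instance (dil_fact : Int) (it : Int) (line : List (List Int)) (out : List (List Int)) : Decidable (Spec_gamma_mul dil_fact it line out) := by unfold Spec_gamma_mul; infer_instance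

-- ===== CLAIM (what is proved, stated in full; the proofs are below) =====
def Claim_equal_gamma_mul : Prop := ∀ (dil_fact : Int) (it : Int) (line : List (List Int)), Dom_gamma_mul dil_fact it line → Pre_gamma_mul dil_fact it line → Spec_gamma_mul dil_fact it line (gamma_mul dil_fact it line)

-- ===== LEMMAS AND PROOFS =====

lemma stepB_eq (k : Int) (out : List (List Int)) : stepB out k = gammaStepA k out := by
  simp [stepB, gammaStepA, Function.comp_def]

lemma pyRange_one_nil (a b : Int) (h : b ≤ a) : PySem.List.pyRange a b 1 = [] := by
  rw [PySem.List.pyRange_one]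
  simp [Int.toNat_of_nonpos (by omega : b - a ≤ 0)]

-- A's fuelled recursion, started at a level 1 ≤ itv ≤ L, is B's left fold over range(itv, L)
lemma loop_eq (n : Nat) : ∀ (L itv : Int) (line : List (List Int)) (fuel : Nat),
    1 ≤ itv → itv + (n : Int) = L → n + 1 ≤ fuel →
    gammaRecA L fuel itv line = (PySem.List.pyRange itv L 1).foldl stepB line := by
  induction n with
  | zero =>
      intro L itv line fuel h1 hL hf
      cases fuel with
      | zero => omega
      | succ f =>
          rw [pyRange_one_nil itv L (by omega)]
          rw [gammaRecA, if_neg (by omega), if_pos (by omega)]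
          rfl
  | succ n ih =>
      intro L itv line fuel h1 hL hf
      cases fuel with
      | zero => omega
      | succ f =>
          rw [PySem.List.pyRange_one_cons (by omega : itv < L)]
          rw [gammaRecA, if_neg (by omega), if_neg (by omega : ¬ itv = L)]
          rw [List.foldl_cons, stepB_eq]
          exact ih L (itv + 1) (gammaStepA itv line) f (by omega) (by omega) (by omega)

-- ===== VERDICT (by name: the statement is the Claim_ definition above) =====
theorem gamma_mul_spec : Claim_equal_gamma_mul := by
  intro d it line _ hpre
  obtain ⟨hd, hit0, hitL⟩ := hpre
  have hn1 : 1 ≤ Nat.log2 d.toNat := (Nat.le_log2 (by omega)).mpr (by omega)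
  have hL1 : 1 ≤ pyLog2 d := by simp [pyLog2]; omega
  show gamma_mul d it line = gamma_mul_alt d it line
  rw [gamma_mul, gamma_mul_alt]
  rcases eq_or_lt_of_le hit0 with h0 | h0
  · -- entry call it = 0: A rebinds line to [[1]] and moves to level 1; B starts its fold there
    rw [← h0]
    have hf : (pyLog2 d - 0).toNat + 2 = (pyLog2 d).toNat + 2 := by omega
    rw [hf, gammaRecA, if_pos rfl]
    exact loop_eq ((pyLog2 d).toNat - 1) (pyLog2 d) 1 [[1]] ((pyLog2 d).toNat + 1)
      le_rfl (by omega) (by omega)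
  · -- resumption or exit call 1 ≤ it ≤ L: the fold runs over range(it, L)
    have hne : ¬ it = 0 := by omega
    simp only [if_neg hne]
    refine loop_eq ((pyLog2 d - it).toNat) (pyLog2 d) it line ((pyLog2 d - it).toNat + 2)
      (by omega) (by simp only [pyLog2] at hitL ⊢; omega) (by omega)
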